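-- pv_equiv track=rewrite | github.com/StealthCat/TeachingExamples | Class Demos/dnd_generator/dnd_generator.py | assign_class
-- ===== SOURCE A (Python) =====
-- def assign_class(new_character):
--     reversed_stats = [(value, key) for key, value in
--                       new_character["stat_list"].items()]
--     sorted_stats = sorted(reversed_stats, reverse=True)
--     top_stat = sorted_stats[0][1]
--     second_stat = sorted_stats[1][1]
--     if top_stat == "Constitution":
--         return "Barbarian"
--     if top_stat == "Intelligence":
--         return "Wizard"
--     if top_stat == "Strength":
--         return "Fighter"
--     if top_stat == "Dexterity":
--         if second_stat == "Wisdom":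
--             return "Ranger"
--         else:
--             return "Rogue"
--     if top_stat == "Wisdom":
--         if second_stat == "Strength" or second_stat == "Constitution":
--             return "Cleric"
--         elif second_stat == "Dexterity":
--             return "Monk"
--         else:
--             return "Druid"
--     if top_stat == "Charisma":
--         if second_stat == "Dexterity":
--             return "Bard"
--         elif second_stat == "Intelligence":
--             return "Sorcerer"
--         elif second_stat == "Wisdom":
--             return "Warlock"
--         else:
--             return "Paladin"
-- ===== SOURCE B (Python) =====
-- def assign_class(new_character):
--     # Single linear scan keeping the two largest (value, key) tuples
--     # instead of sorting the whole stat list.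
--     best1 = None
--     best2 = None
--     for key, value in new_character["stat_list"].items():
--         t = (value, key)
--         if best1 is None or t > best1:
--             best1, best2 = t, best1
--         elif best2 is None or t > best2:
--             best2 = t
--     top_stat = best1[1]
--     second_stat = best2[1]
--     simple = {"Constitution": "Barbarian",
--               "Intelligence": "Wizard",
--               "Strength": "Fighter"}
--     if top_stat in simple:
--         return simple[top_stat]
--     if top_stat == "Dexterity":
--         return "Ranger" if second_stat == "Wisdom" else "Rogue"
--     if top_stat == "Wisdom":
--         return {"Strength": "Cleric", "Constitution": "Cleric",
--                 "Dexterity": "Monk"}.get(second_stat, "Druid")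
--     if top_stat == "Charisma":
--         return {"Dexterity": "Bard", "Intelligence": "Sorcerer",
--                 "Wisdom": "Warlock"}.get(second_stat, "Paladin")
-- ===== Notes on version B (the rewrite author's own statement) =====
-- stated objective: alternative
-- what changed: Replaces building and reverse-sorting the whole (value, key) list with a single linear scan that maintains the two largest (value, key) tuples (whole-tuple comparison preserves the sort's tie-breaking), and replaces the three literal-string if-chains for the simple classes and the Wisdom/Charisma sub-cases with dictionary lookups.
-- outside the precondition, e.g. on assign_class({'stat_list': {'Luck': 3, 'Moxie': 2}}): A returns None, B returns None
import Mathlib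
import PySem

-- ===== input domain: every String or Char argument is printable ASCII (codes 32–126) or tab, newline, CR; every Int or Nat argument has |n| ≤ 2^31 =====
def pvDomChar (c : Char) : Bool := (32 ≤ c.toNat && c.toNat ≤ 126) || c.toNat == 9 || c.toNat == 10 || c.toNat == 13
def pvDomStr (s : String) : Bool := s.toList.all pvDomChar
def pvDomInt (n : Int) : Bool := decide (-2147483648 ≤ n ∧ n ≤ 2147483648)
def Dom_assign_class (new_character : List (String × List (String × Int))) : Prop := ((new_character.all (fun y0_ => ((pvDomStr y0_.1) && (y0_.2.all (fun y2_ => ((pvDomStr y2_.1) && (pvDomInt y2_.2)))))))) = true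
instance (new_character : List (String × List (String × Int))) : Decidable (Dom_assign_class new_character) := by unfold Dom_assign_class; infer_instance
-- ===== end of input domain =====

-- B replaces the full reverse-sort of (value, key) pairs by a single linear top-2 scan
-- and table lookups for the class names; equivalence of the returned string is proved on Pre_.


-- ===== PORT A =====
def assign_class (new_character : List (String × List (String × Int))) : String :=
  let stat_list := PySem.Dict.ofList ((PySem.Dict.ofList new_character).getD "stat_list" [])
  let reversed_stats := stat_list.items.map (fun kv => (kv.2, kv.1))
  let sorted_stats := PySem.List.sorted2 reversed_stats (fun t => t.1) (fun t => t.2) true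
  let top_stat := ((PySem.List.pyGet? sorted_stats 0).getD ((0 : Int), "")).2
  let second_stat := ((PySem.List.pyGet? sorted_stats 1).getD ((0 : Int), "")).2
  if top_stat == "Constitution" then "Barbarian"
  else if top_stat == "Intelligence" then "Wizard"
  else if top_stat == "Strength" then "Fighter"
  else if top_stat == "Dexterity" then
    (if second_stat == "Wisdom" then "Ranger" else "Rogue")
  else if top_stat == "Wisdom" then
    (if second_stat == "Strength" || second_stat == "Constitution" then "Cleric"
     else if second_stat == "Dexterity" then "Monk"
     else "Druid")
  else if top_stat == "Charisma" then
    (if second_stat == "Dexterity" then "Bard"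
     else if second_stat == "Intelligence" then "Sorcerer"
     else if second_stat == "Wisdom" then "Warlock"
     else "Paladin")
  else ""   -- Python falls off the end and returns None here; excluded by Pre_

-- ===== PORT B =====
-- Python tuple comparison  t > b  on (int, str) pairs
def pvTupGt (t b : Int × String) : Bool :=
  decide (b.1 < t.1) || (decide (b.1 = t.1) && decide (b.2 < t.2))

-- one step of Source B's top-2 scan (best1, best2 as Options = Python None)
def pvStep (acc : Option (Int × String) × Option (Int × String)) (t : Int × String) :
    Option (Int × String) × Option (Int × String) :=
  match acc with
  | (none, _) => (some t, none)
  | (some b1, b2) =>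
    if pvTupGt t b1 then (some t, some b1)
    else
      match b2 with
      | none => (some b1, some t)
      | some b2' => if pvTupGt t b2' then (some b1, some t) else (some b1, some b2')

def assign_class_alt (new_character : List (String × List (String × Int))) : String :=
  let stat_list := PySem.Dict.ofList ((PySem.Dict.ofList new_character).getD "stat_list" [])
  let best := stat_list.items.foldl (fun acc kv => pvStep acc (kv.2, kv.1)) (none, none)
  let top_stat := (best.1.getD ((0 : Int), "")).2
  let second_stat := (best.2.getD ((0 : Int), "")).2
  let simple := PySem.Dict.ofList
    [("Constitution", "Barbarian"), ("Intelligence", "Wizard"), ("Strength", "Fighter")]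
  if simple.contains top_stat then simple.getD top_stat ""
  else if top_stat == "Dexterity" then
    (if second_stat == "Wisdom" then "Ranger" else "Rogue")
  else if top_stat == "Wisdom" then
    (PySem.Dict.ofList [("Strength", "Cleric"), ("Constitution", "Cleric"),
                        ("Dexterity", "Monk")]).getD second_stat "Druid"
  else if top_stat == "Charisma" then
    (PySem.Dict.ofList [("Dexterity", "Bard"), ("Intelligence", "Sorcerer"),
                        ("Wisdom", "Warlock")]).getD second_stat "Paladin"
  else ""   -- Source B also returns None here; excluded by Pre_

-- ===== PRECONDITION & SPEC =====
def pvSix : List String :=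
  ["Constitution", "Intelligence", "Strength", "Dexterity", "Wisdom", "Charisma"]

-- Pre_ excludes: a missing "stat_list" key (A raises KeyError), fewer than two distinct stats
-- (A raises IndexError), and a highest (value, key) pair whose stat name is none of the six
-- D&D abilities (A falls off the if-chain and returns None, not a string).
def Pre_assign_class (new_character : List (String × List (String × Int))) : Prop :=
  ((PySem.Dict.ofList new_character).contains "stat_list"
    && (let rs := ((PySem.Dict.ofList ((PySem.Dict.ofList new_character).getD "stat_list" [])).items).map
          (fun kv => (kv.2, kv.1));
        decide (2 ≤ rs.length)
          && ((PySem.List.max2? rs (fun t => t.1) (fun t => t.2)).any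
                (fun t => decide (t.2 ∈ pvSix))))) = true
instance (new_character : List (String × List (String × Int))) : Decidable (Pre_assign_class new_character) := by unfold Pre_assign_class; infer_instance

def pvWitness_assign_class : (List (String × List (String × Int))) :=
  [("stat_list", [("Strength", 15), ("Dexterity", 12)])]

def Spec_assign_class (new_character : List (String × List (String × Int))) (out : String) : Prop := out = assign_class_alt new_character
instance (new_character : List (String × List (String × Int))) (out : String) : Decidable (Spec_assign_class new_character out) := by unfold Spec_assign_class; infer_instance

-- ===== CLAIM (what is proved, stated in full; the proofs are below) =====
def Claim_equal_assign_class : Prop := ∀ (new_character : List (String × List (String × Int))), Dom_assign_class new_character → Pre_assign_class new_character → Spec_assign_class new_character (assign_class new_character)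

-- ===== LEMMAS AND PROOFS =====

-- the insertion predicate sorted2 (reverse=True) uses on (Int, String) pairs
def pvBefore (x y : Int × String) : Bool :=
  decide (y.1 < x.1) || (!decide (x.1 < y.1) && decide (y.2 < x.2))

theorem pvTupGt_eq_pvBefore (x y : Int × String) : pvTupGt x y = pvBefore x y := by
  unfold pvTupGt pvBefore
  rcases lt_trichotomy x.1 y.1 with h | h | h
  · simp [lt_asymm h, h.ne', h]
  · simp [h]
  · simp [h]

theorem pvSorted2_rev_eq (rs : List (Int × String)) :
    PySem.List.sorted2 rs (fun t => t.1) (fun t => t.2) true =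
      rs.foldl (fun acc x => PySem.List.insertBy pvBefore x acc) [] := rfl

theorem pvStep_insertBy (x : Int × String) (s : List (Int × String)) :
    pvStep (s[0]?, s[1]?) x =
      ((PySem.List.insertBy pvBefore x s)[0]?, (PySem.List.insertBy pvBefore x s)[1]?) := by
  match s with
  | [] => simp [pvStep, PySem.List.insertBy]
  | [a] =>
    by_cases h : pvBefore x a = true <;>
      simp [pvStep, PySem.List.insertBy, pvTupGt_eq_pvBefore, h]
  | a :: b :: rest =>
    by_cases h1 : pvBefore x a = true <;> by_cases h2 : pvBefore x b = true <;>
      simp [pvStep, PySem.List.insertBy, pvTupGt_eq_pvBefore, h1, h2]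

theorem pvScan_eq_sorted (l : List (Int × String)) (s : List (Int × String)) :
    l.foldl pvStep (s[0]?, s[1]?) =
      ((l.foldl (fun acc x => PySem.List.insertBy pvBefore x acc) s)[0]?,
       (l.foldl (fun acc x => PySem.List.insertBy pvBefore x acc) s)[1]?) := by
  induction l generalizing s with
  | nil => rfl
  | cons x l ih =>
    simp only [List.foldl_cons]
    rw [pvStep_insertBy]
    exact ih (PySem.List.insertBy pvBefore x s)

def pvMStep (acc : Option (Int × String)) (x : Int × String) : Option (Int × String) :=
  match acc with
  | none => some x
  | some m => if pvBefore x m then some x else some m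

theorem pvStep_fst (p : Option (Int × String) × Option (Int × String)) (x : Int × String) :
    (pvStep p x).1 = pvMStep p.1 x := by
  rcases p with ⟨b1, b2⟩
  match b1 with
  | none => rfl
  | some m =>
    simp only [pvStep, pvMStep, pvTupGt_eq_pvBefore]
    by_cases h : pvBefore x m = true
    · simp only [if_pos h]
    · simp only [if_neg h]
      match b2 with
      | none => rfl
      | some b2' =>
        by_cases h2 : pvBefore x b2' = true
        · simp only [if_pos h2]
        · simp only [if_neg h2]

theorem pvScan_fst (l : List (Int × String)) :
    ∀ p : Option (Int × String) × Option (Int × String),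
      (l.foldl pvStep p).1 = l.foldl pvMStep p.1 := by
  induction l with
  | nil => intro p; rfl
  | cons x l ih =>
    intro p
    rw [List.foldl_cons, List.foldl_cons, ih, pvStep_fst]

theorem pvMax2_eq_scan_fst (l : List (Int × String)) :
    PySem.List.max2? l (fun t => t.1) (fun t => t.2) =
      (l.foldl pvStep (none, none)).1 := by
  rw [pvScan_fst]
  unfold PySem.List.max2?
  apply PySem.List.foldl_congr_mem
  intro acc x _
  cases acc with
  | none => rfl
  | some m => rfl

theorem pvScan_eq_sorted_nil (l : List (Int × String)) :
    l.foldl pvStep (none, none) =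
      ((PySem.List.sorted2 l (fun t => t.1) (fun t => t.2) true)[0]?,
       (PySem.List.sorted2 l (fun t => t.1) (fun t => t.2) true)[1]?) := by
  rw [pvSorted2_rev_eq]
  exact pvScan_eq_sorted l []

-- ===== VERDICT (by name: the statement is the Claim_ definition above) =====
theorem assign_class_spec : Claim_equal_assign_class := by
  intro nc _hdom hpre
  unfold Pre_assign_class at hpre
  unfold Spec_assign_class assign_class assign_class_alt
  simp only [Bool.and_eq_true, decide_eq_true_eq, Option.any_eq_true] at hpre
  obtain ⟨-, hlen, t0, hmax, htop⟩ := hpre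
  set sl := PySem.Dict.ofList ((PySem.Dict.ofList nc).getD "stat_list" []) with hsl
  set rs := sl.items.map (fun kv => (kv.2, kv.1)) with hrs
  set ss := PySem.List.sorted2 rs (fun t => t.1) (fun t => t.2) true with hss
  have hperm := PySem.List.sorted2_perm rs (fun t => t.1) (fun t => t.2) true
  have hlen2 : 2 ≤ ss.length := by rw [hperm.length_eq]; simpa [hrs] using hlen
  obtain ⟨t1, t2, rest, hs3⟩ : ∃ t1 t2 rest, ss = t1 :: t2 :: rest := by
    match hx : ss with
    | [] => simp at hlen2
    | [a] => simp at hlen2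
    | a :: b :: r => exact ⟨a, b, r, rfl⟩
  have hbest : rs.foldl pvStep (none, none) = (some t1, some t2) := by
    rw [pvScan_eq_sorted_nil, ← hss, hs3]; rfl
  have hfold : sl.items.foldl (fun acc kv => pvStep acc (kv.2, kv.1)) (none, none) =
      (some t1, some t2) := by
    rw [← hbest, hrs, List.foldl_map]
  have ht1 : t0 = t1 := by
    have h := pvMax2_eq_scan_fst rs
    rw [hbest] at h
    rw [hrs] at hmax
    rw [hmax] at h
    exact Option.some_inj.mp h
  rw [ht1] at htop
  dsimp only
  rw [← hrs, ← hss, hs3, hfold]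
  have hnn : (0 : Int) ≤ (rest.length : Int) + 1 := by positivity
  have e0 : PySem.List.pyGet? (t1 :: t2 :: rest) 0 = some t1 := by
    simp [PySem.List.pyGet?, PySem.List.pyIdx?, hnn]
  have e1 : PySem.List.pyGet? (t1 :: t2 :: rest) 1 = some t2 := by
    simp [PySem.List.pyGet?, PySem.List.pyIdx?]
  rw [e0, e1]
  simp only [Option.getD_some]
  simp only [pvSix, List.mem_cons, List.not_mem_nil, or_false] at htop
  rcases htop with h | h | h | h | h | h <;> simp only [h] <;>
    [skip; skip; skip; skip; skip; skip]
  · simp [PySem.Dict.contains, PySem.Dict.ofList, PySem.Dict.update, PySem.Dict.empty,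
      PySem.Dict.insert, PySem.Dict.getD, PySem.Dict.get?]
  · simp [PySem.Dict.contains, PySem.Dict.ofList, PySem.Dict.update, PySem.Dict.empty,
      PySem.Dict.insert, PySem.Dict.getD, PySem.Dict.get?]
  · simp [PySem.Dict.contains, PySem.Dict.ofList, PySem.Dict.update, PySem.Dict.empty,
      PySem.Dict.insert, PySem.Dict.getD, PySem.Dict.get?]
  · simp [PySem.Dict.contains, PySem.Dict.ofList, PySem.Dict.update, PySem.Dict.empty,
      PySem.Dict.insert]
  · -- Wisdom
    by_cases h1 : t2.2 = "Strength"
    · simp only [h1]; decide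
    · by_cases h2 : t2.2 = "Constitution"
      · simp only [h2]; decide
      · by_cases h3 : t2.2 = "Dexterity"
        · simp only [h3]; decide
        · simp [PySem.Dict.contains, PySem.Dict.ofList, PySem.Dict.update, PySem.Dict.empty,
            PySem.Dict.insert, PySem.Dict.getD, PySem.Dict.get?, h1, h2, h3,
            Ne.symm h1, Ne.symm h2, Ne.symm h3]
  · -- Charisma
    by_cases h1 : t2.2 = "Dexterity"
    · simp only [h1]; decide
    · by_cases h2 : t2.2 = "Intelligence"
      · simp only [h2]; decide
      · by_cases h3 : t2.2 = "Wisdom"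
        · simp only [h3]; decide
        · simp [PySem.Dict.contains, PySem.Dict.ofList, PySem.Dict.update, PySem.Dict.empty,
            PySem.Dict.insert, PySem.Dict.getD, PySem.Dict.get?, h1, h2, h3,
            Ne.symm h1, Ne.symm h2, Ne.symm h3]
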